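-- pv_equiv track=rewrite | github.com/GSbioinfo/scEDIT | gRNA_ML_models/gRNA_context_writer.py | find_ng_pams
-- ===== SOURCE A (Python) =====
-- def find_ng_pams(sequence):
--     sequence = sequence.upper()
--     valid_first_bases = {'A', 'T', 'C', 'G'}
--     matches = []
--
--     for i in range(len(sequence) - 1):
--         dinuc = sequence[i:i+2]
--         if dinuc[0] in valid_first_bases and dinuc[1] == 'G':
--             matches.append((i, dinuc))
--
--     return matches
-- ===== SOURCE B (Python) =====
-- def find_ng_pams(sequence):
--     s = sequence.upper()
--     matches = []
--     j = s.find('G', 1)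
--     while j != -1:
--         prev = s[j - 1]
--         if prev in 'ACGT':
--             matches.append((j - 1, prev + 'G'))
--         j = s.find('G', j + 1)
--     return matches
-- ===== Notes on version B (the rewrite author's own statement) =====
-- stated objective: faster
-- what changed: Instead of testing a compound condition at every index, B is search-driven: it repeatedly jumps to the next guanine character with str.find and looks back one position, so only guanine positions are examined in Python code.
import Mathlib
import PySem

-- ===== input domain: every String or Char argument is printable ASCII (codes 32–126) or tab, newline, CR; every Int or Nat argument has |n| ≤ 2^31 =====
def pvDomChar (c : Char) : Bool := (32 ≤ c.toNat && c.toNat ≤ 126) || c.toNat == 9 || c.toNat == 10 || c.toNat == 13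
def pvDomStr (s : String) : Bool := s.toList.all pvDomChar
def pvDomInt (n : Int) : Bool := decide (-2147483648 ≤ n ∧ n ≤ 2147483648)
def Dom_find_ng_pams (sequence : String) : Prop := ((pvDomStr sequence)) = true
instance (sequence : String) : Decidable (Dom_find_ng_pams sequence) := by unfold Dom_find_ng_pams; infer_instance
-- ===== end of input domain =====

-- B replaces A's test-at-every-index scan by a search-driven loop: jump to each 'G' with s.find and look back one char (measurably faster by a constant factor: the scan runs inside str.find).


-- ===== PORT A =====
-- literal port of A: upper-case, then for i in range(len-1) slice the dinucleotide and test its two characters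
def find_ng_pams (sequence : String) : List (Int × String) :=
  let seq := PySem.Str.upper sequence
  (PySem.List.pyRange 0 (PySem.Str.len seq - 1) 1).foldl
    (fun acc i =>
      let dinuc := PySem.Str.slice seq (some i) (some (i + 2))
      if ((PySem.Str.pyGet? dinuc 0 == some 'A' || PySem.Str.pyGet? dinuc 0 == some 'T' ||
           PySem.Str.pyGet? dinuc 0 == some 'C' || PySem.Str.pyGet? dinuc 0 == some 'G') &&
          PySem.Str.pyGet? dinuc 1 == some 'G')
      then acc ++ [(i, dinuc)] else acc) []

-- ===== PORT B =====
-- literal port of B's while loop: j = s.find('G', 1); while j != -1: look back at s[j-1]; j = s.find('G', j+1).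
-- Fuel only makes the recursion total (each found j is a fresh 'G' index < len, so len iterations suffice);
-- s[j-1] is always in range in reachable calls (j ≥ 1), so pyGetD's default is never read.
def pvLoopB (l : List Char) : Nat → Int → List (Int × String)
  | 0, _ => []
  | fuel + 1, j =>
    if j == -1 then []
    else
      let prev := PySem.List.pyGetD l (j - 1) ' '
      (if prev ∈ ['A', 'C', 'G', 'T'] then [(j - 1, String.ofList [prev, 'G'])] else []) ++
      pvLoopB l fuel (PySem.Chars.findFrom l ['G'] (j + 1) none)

def find_ng_pams_alt (sequence : String) : List (Int × String) :=
  let l := (PySem.Str.upper sequence).toList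
  pvLoopB l l.length (PySem.Chars.findFrom l ['G'] 1 none)

-- ===== PRECONDITION & SPEC =====
def Spec_find_ng_pams (sequence : String) (out : List (Int × String)) : Prop := out = find_ng_pams_alt sequence
instance (sequence : String) (out : List (Int × String)) : Decidable (Spec_find_ng_pams sequence out) := by unfold Spec_find_ng_pams; infer_instance

-- ===== CLAIM (what is proved, stated in full; the proofs are below) =====
def Claim_equal_find_ng_pams : Prop := ∀ (sequence : String), Dom_find_ng_pams sequence → Spec_find_ng_pams sequence (find_ng_pams sequence)

-- ===== LEMMAS AND PROOFS =====

-- A's per-index test and per-index result, at the character-list level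
def pvPl (l : List Char) (i : Int) : Bool :=
  let d := PySem.List.slice l (some i) (some (i + 2))
  ((PySem.List.pyGet? d 0 == some 'A' || PySem.List.pyGet? d 0 == some 'T' ||
    PySem.List.pyGet? d 0 == some 'C' || PySem.List.pyGet? d 0 == some 'G') &&
   PySem.List.pyGet? d 1 == some 'G')

def pvFl (l : List Char) (i : Int) : Int × String :=
  (i, String.ofList (PySem.List.slice l (some i) (some (i + 2))))

-- the common reference recursion: walk the list keeping the absolute index
def pvGo : Int → List Char → List (Int × String)
  | _, [] => []
  | _, [_] => []
  | s, a :: b :: rest =>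
      (if a ∈ ['A', 'C', 'G', 'T'] ∧ b = 'G' then [(s, String.ofList [a, b])] else []) ++
      pvGo (s + 1) (b :: rest)

theorem pvGo_shift (l : List Char) : ∀ s : Int,
    pvGo (s + 1) l = (pvGo s l).map (fun p => (p.1 + 1, p.2)) := by
  induction l with
  | nil => intro s; simp [pvGo]
  | cons a t ih =>
    intro s
    cases t with
    | nil => simp [pvGo]
    | cons b r =>
      simp only [pvGo, List.map_append, ih]
      split_ifs <;> simp

theorem pvPl_cons (a b : Char) (r : List Char) :
    pvPl (a :: b :: r) 0 = decide (a ∈ ['A', 'C', 'G', 'T'] ∧ b = 'G') := by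
  have h : PySem.List.slice (a :: b :: r) (some 0) (some 2) = [a, b] := by
    have := PySem.List.slice_natCast_add (a :: b :: r) 0 2
    simpa using this
  simp only [pvPl]
  norm_num [h, PySem.List.pyGet?, PySem.List.pyIdx?]
  by_cases hb : b = 'G' <;> by_cases hA : a = 'A' <;> by_cases hT : a = 'T' <;>
    by_cases hC : a = 'C' <;> by_cases hG : a = 'G' <;> simp_all

theorem pvshift_P (m : List Char) (a : Char) (k : Nat) :
    pvPl (a :: m) ((k : Int) + 1) = pvPl m (k : Int) := by
  have h : PySem.List.slice (a :: m) (some ((k : Int) + 1)) (some ((k : Int) + 1 + 2)) =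
      PySem.List.slice m (some (k : Int)) (some ((k : Int) + 2)) := by
    have h1 := PySem.List.slice_natCast_add (a :: m) (k + 1) 2
    have h2 := PySem.List.slice_natCast_add m k 2
    push_cast at h1 h2
    rw [h1, h2]
    simp [List.drop_succ_cons]
  simp [pvPl, h]

theorem pvshift_F (m : List Char) (a : Char) (k : Nat) :
    pvFl (a :: m) ((k : Int) + 1) = ((pvFl m (k : Int)).1 + 1, (pvFl m (k : Int)).2) := by
  have h : PySem.List.slice (a :: m) (some ((k : Int) + 1)) (some ((k : Int) + 1 + 2)) =
      PySem.List.slice m (some (k : Int)) (some ((k : Int) + 2)) := by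
    have h1 := PySem.List.slice_natCast_add (a :: m) (k + 1) 2
    have h2 := PySem.List.slice_natCast_add m k 2
    push_cast at h1 h2
    rw [h1, h2]
    simp [List.drop_succ_cons]
  simp [pvFl, h]

theorem A_eq_go (l : List Char) :
    ((PySem.List.pyRange 0 ((l.length : Int) - 1) 1).filter (pvPl l)).map (pvFl l) =
      pvGo 0 l := by
  induction l with
  | nil =>
    rw [PySem.List.pyRange_one_eq_nil (by simp)]
    simp [pvGo]
  | cons a t ih =>
    cases t with
    | nil =>
      rw [PySem.List.pyRange_one_eq_nil (by simp)]
      simp [pvGo]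
    | cons b r =>
      have hlen : ((a :: b :: r).length : Int) - 1 = (r.length : Int) + 1 := by
        simp only [List.length_cons]; push_cast; ring
      rw [hlen, PySem.List.pyRange_one_cons (by positivity)]
      have hr1 : PySem.List.pyRange (0 + 1) ((r.length : Int) + 1) 1 =
          (List.range r.length).map (fun k : Nat => ((k : Int) + 1)) := by
        rw [PySem.List.pyRange_one]
        have ht : (((r.length : Int) + 1) - (0 + 1)).toNat = r.length := by omega
        rw [ht]
        exact List.map_congr_left (fun k _ => by omega)
      have hr0 : PySem.List.pyRange 0 (((b :: r).length : Int) - 1) 1 =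
          (List.range r.length).map (fun k : Nat => (k : Int)) := by
        rw [PySem.List.pyRange_one]
        have ht : ((((b :: r).length : Int) - 1) - 0).toNat = r.length := by
          simp only [List.length_cons]; push_cast; omega
        rw [ht]
        exact List.map_congr_left (fun k _ => by omega)
      rw [hr0, List.filter_map, List.map_map] at ih
      have htail :
          ((PySem.List.pyRange (0 + 1) ((r.length : Int) + 1) 1).filter
              (pvPl (a :: b :: r))).map (pvFl (a :: b :: r)) =
            (pvGo 0 (b :: r)).map (fun p => (p.1 + 1, p.2)) := by
        rw [hr1, List.filter_map, List.map_map]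
        have hp : (pvPl (a :: b :: r)) ∘ (fun k : Nat => ((k : Int) + 1)) =
            (pvPl (b :: r)) ∘ (fun k : Nat => ((k : Int))) :=
          funext (fun k => pvshift_P (b :: r) a k)
        rw [hp, ← ih, List.map_map]
        refine List.map_congr_left (fun k _ => ?_)
        simp only [Function.comp_apply]
        exact pvshift_F (b :: r) a k
      have hF0 : pvFl (a :: b :: r) 0 = ((0 : Int), String.ofList [a, b]) := by
        have h : PySem.List.slice (a :: b :: r) (some 0) (some 2) = [a, b] := by
          have := PySem.List.slice_natCast_add (a :: b :: r) 0 2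
          simpa using this
        simp only [pvFl]
        norm_num [h]
      have hgo : pvGo 0 (a :: b :: r) =
          (if a ∈ ['A', 'C', 'G', 'T'] ∧ b = 'G' then [((0 : Int), String.ofList [a, b])]
           else []) ++ (pvGo 0 (b :: r)).map (fun p => (p.1 + 1, p.2)) := by
        rw [pvGo, show (0 : Int) + 1 = 0 + 1 from rfl, pvGo_shift]
      by_cases hc : a ∈ ['A', 'C', 'G', 'T'] ∧ b = 'G'
      · rw [List.filter_cons, pvPl_cons, if_pos (by simpa using hc), List.map_cons,
          hF0, htail, hgo, if_pos hc, List.singleton_append]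
      · rw [List.filter_cons, pvPl_cons, if_neg (by simpa using hc), htail, hgo,
          if_neg hc, List.nil_append]

-- B-side lemmas

theorem pvGo_short (l : List Char) (s : Int) (h : l.length ≤ 1) : pvGo s l = [] := by
  match l, h with
  | [], _ => rfl
  | [_], _ => rfl

theorem pvGo_noG (l : List Char) (s : Int) (h : ∀ c ∈ l.tail, c ≠ 'G') : pvGo s l = [] := by
  induction l generalizing s with
  | nil => rfl
  | cons a t ih =>
    cases t with
    | nil => rfl
    | cons b r =>
      have hb : b ≠ 'G' := h b (by simp)
      rw [pvGo, if_neg (by tauto), List.nil_append]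
      exact ih (s + 1) (fun c hc => h c (by simp_all))

theorem pvGo_skip (A : List Char) : ∀ (a : Char) (rest : List Char) (s : Int),
    (∀ c ∈ A, c ≠ 'G') →
    pvGo s (a :: (A ++ rest)) = pvGo (s + A.length) (A.getLastD a :: rest) := by
  induction A with
  | nil => intro a rest s _; simp [List.getLastD]
  | cons b A' ih =>
    intro a rest s h
    have hb : b ≠ 'G' := h b (by simp)
    rw [List.cons_append, pvGo, if_neg (by tauto), List.nil_append,
      ih b rest (s + 1) (fun c hc => h c (by simp_all)), List.getLastD_cons]
    congr 1
    simp only [List.length_cons]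
    push_cast
    ring

theorem pvGetCongr (l : List Char) (i j : Nat) (h : i = j) (hi : i < l.length) :
    l[i] = l[j]'(h ▸ hi) := by
  subst h; rfl

theorem pvTakeLastD (t : List Char) (a : Char) (d : Nat) (h : d < (a :: t).length) :
    (t.take d).getLastD a = (a :: t)[d] := by
  cases d with
  | zero => simp
  | succ d' =>
    have hd : d' < t.length := by simpa using h
    have h1 : t.take (d' + 1) = t.take d' ++ [t[d']] := by
      rw [List.take_add_one, List.getElem?_eq_getElem hd]; rfl
    rw [h1, List.getLastD_concat]
    simp

theorem pvSingPrefix (a : Char) (l : List Char) : [a] <+: l ↔ ∃ u, l = a :: u := by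
  cases l with
  | nil => simp
  | cons b m =>
    simp only [List.cons_prefix_cons, List.nil_prefix, and_true]
    constructor
    · rintro rfl; exact ⟨m, rfl⟩
    · rintro ⟨u, hu⟩
      injection hu with h1 _
      exact h1.symm

theorem loopB_eq_go (l : List Char) : ∀ (fuel k : Nat), 1 ≤ k → k ≤ l.length →
    l.length ≤ k + fuel →
    pvLoopB l fuel (PySem.Chars.findFrom l ['G'] (k : Int) none) =
      pvGo ((k : Int) - 1) (l.drop (k - 1)) := by
  intro fuel
  induction fuel with
  | zero =>
    intro k hk1 hk2 hf
    rw [pvLoopB, pvGo_short _ _ (by simp; omega)]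
  | succ fuel ih =>
    intro k hk1 hk2 hf
    by_cases hr : PySem.Chars.findFrom l ['G'] (k : Int) none = -1
    · -- no further 'G': both sides are empty
      rw [pvLoopB, if_pos (by simpa using hr), pvGo_noG]
      intro c hc
      rw [List.tail_drop, Nat.sub_add_cancel hk1] at hc
      have hnoG : ¬ ['G'] <:+: l.drop k :=
        (PySem.Chars.findFrom_natCast_eq_neg_one_iff l ['G'] k hk2).mp hr
      intro hcG
      exact hnoG ((List.singleton_infix_iff 'G' (l.drop k)).mpr (hcG ▸ hc))
    · obtain ⟨hkr, hpre, hmin⟩ := PySem.Chars.findFrom_natCast_spec l ['G'] k hk2 hr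
      set r := PySem.Chars.findFrom l ['G'] (k : Int) none with hrdef
      set m := r.toNat with hm
      have hrm : r = (m : Int) := (Int.toNat_of_nonneg (le_trans (by positivity) hkr)).symm
      have hkm : k ≤ m := by omega
      obtain ⟨u, hu⟩ := (pvSingPrefix 'G' (l.drop m)).mp hpre
      have hmlen : m < l.length := by
        by_contra hge
        rw [List.drop_eq_nil_of_le (by omega)] at hu
        simp at hu
      have hdropm : l.drop m = 'G' :: l.drop (m + 1) := by
        rw [List.drop_eq_getElem_cons hmlen] at hu ⊢
        rw [List.cons.injEq] at hu
        rw [hu.1]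
      -- left side: one loop step, then the induction hypothesis at k' = m + 1
      have hprev : PySem.List.pyGetD l (r - 1) ' ' = l[m - 1]'(by omega) := by
        have : r - 1 = ((m - 1 : Nat) : Int) := by omega
        rw [this, PySem.List.pyGetD_natCast, List.getD_eq_getElem _ _ (by omega)]
      have hnext : r + 1 = ((m + 1 : Nat) : Int) := by omega
      have hihres := ih (m + 1) (by omega) (by omega) (by omega)
      rw [pvLoopB, if_neg (by simp only [hrm, beq_iff_eq]; omega), hprev, hnext, hihres]
      simp only [Nat.add_sub_cancel]
      -- right side: split the dropped list at the next 'G'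
      have hk1lt : k - 1 < l.length := by omega
      have hdropk1 : l.drop (k - 1) = l[k - 1] :: l.drop k := by
        rw [List.drop_eq_getElem_cons hk1lt]
        rw [Nat.sub_add_cancel hk1]
      have hsplit : l.drop k = (l.drop k).take (m - k) ++ l.drop m := by
        conv_lhs => rw [← List.take_append_drop (m - k) (l.drop k)]
        rw [List.drop_drop, Nat.add_sub_cancel' hkm]
      have hAlen : ((l.drop k).take (m - k)).length = m - k := by
        rw [List.length_take, List.length_drop]
        omega
      have hAnoG : ∀ c ∈ (l.drop k).take (m - k), c ≠ 'G' := by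
        intro c hc
        obtain ⟨j0, hj0, hc⟩ := List.mem_iff_getElem.mp hc
        rw [hAlen] at hj0
        have hj0' : k + j0 < l.length := by omega
        have hcv : c = l[k + j0] := by
          rw [← hc, List.getElem_take, List.getElem_drop]
        have hne := hmin (k + j0) (by omega) (by omega)
        intro hcG
        apply hne
        rw [(pvSingPrefix 'G' (l.drop (k + j0)))]
        exact ⟨l.drop (k + j0 + 1), by
          rw [List.drop_eq_getElem_cons hj0', ← hcv, hcG]⟩
      have hlast : ((l.drop k).take (m - k)).getLastD (l[k - 1]'hk1lt) = l[m - 1]'(by omega) := by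
        rw [pvTakeLastD _ _ _ (by simp; omega)]
        rcases Nat.eq_zero_or_pos (m - k) with h0 | hpos
        · rw [pvGetCongr _ _ 0 h0 _, List.getElem_cons_zero]
          exact pvGetCongr l (k - 1) (m - 1) (by omega) hk1lt
        · rw [pvGetCongr _ _ ((m - k - 1) + 1) (by omega) _, List.getElem_cons_succ,
            List.getElem_drop]
          exact pvGetCongr l (k + (m - k - 1)) (m - 1) (by omega) (by omega)
      rw [hdropk1, hsplit, pvGo_skip _ _ _ _ hAnoG, hAlen, hlast, hdropm, pvGo]
      have hidx : (k : Int) - 1 + ((m - k : Nat) : Int) = (m : Int) - 1 := by omega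
      rw [hidx]
      have hidx2 : (m : Int) - 1 + 1 = ((m : Int)) := by ring
      rw [hidx2, ← hdropm, ← hrm]
      congr 1
      · by_cases hc : l[m - 1]'(by omega) ∈ ['A', 'C', 'G', 'T']
        · rw [if_pos hc, if_pos (by tauto), hrm]
        · rw [if_neg hc, if_neg (by tauto)]
      · rw [hrm]
        congr 1
        push_cast
        ring

-- ===== VERDICT (by name: the statement is the Claim_ definition above) =====
theorem find_ng_pams_spec : Claim_equal_find_ng_pams := by
  intro sequence _
  unfold Spec_find_ng_pams find_ng_pams find_ng_pams_alt
  dsimp only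
  have hbody : (fun (acc : List (Int × String)) (i : Int) =>
      let dinuc := PySem.Str.slice (PySem.Str.upper sequence) (some i) (some (i + 2))
      if ((PySem.Str.pyGet? dinuc 0 == some 'A' || PySem.Str.pyGet? dinuc 0 == some 'T' ||
           PySem.Str.pyGet? dinuc 0 == some 'C' || PySem.Str.pyGet? dinuc 0 == some 'G') &&
          PySem.Str.pyGet? dinuc 1 == some 'G') = true
      then acc ++ [(i, dinuc)] else acc) =
    (fun acc i => if pvPl (PySem.Str.upper sequence).toList i = true
      then acc ++ [pvFl (PySem.Str.upper sequence).toList i] else acc) := by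
    funext acc i
    simp only [pvPl, pvFl, PySem.Str.pyGet?, PySem.Str.slice, PySem.Chars.pyGet?,
      PySem.Chars.slice, String.toList_ofList]
  rw [hbody, PySem.List.foldl_append_if, List.nil_append]
  have hlen : PySem.Str.len (PySem.Str.upper sequence) =
      (((PySem.Str.upper sequence).toList.length : Int)) := by
    simp [PySem.Str.len]
  rw [hlen, A_eq_go]
  -- now: pvGo 0 l = pvLoopB l l.length (findFrom l ['G'] 1 none)
  set l := (PySem.Str.upper sequence).toList with hl
  rcases Nat.eq_zero_or_pos l.length with h0 | h1
  · rw [List.length_eq_zero_iff.mp h0]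
    rfl
  · have := loopB_eq_go l l.length 1 le_rfl h1 (by omega)
    simpa using this.symm
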